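-- pv_equiv track=rewrite | github.com/keep-starknet-strange/garaga | tools/starknet/groth16_contract_generator/parsing_utils.py | find_item_from_key_patterns
-- ===== SOURCE A (Python) =====
-- from typing import Any, Dict, List
--
-- def find_item_from_key_patterns(data: dict, key_patterns: List[str]) -> Any:
--     best_match = None
--     best_score = -1
--     for key, value in data.items():
--         for pattern in key_patterns:
--             if key.lower() == pattern.lower():
--                 # Exact match
--                 return value
--             elif pattern.lower() in key.lower():
--                 # Partial match
--                 score = key.lower().count(pattern.lower())
--                 if score > best_score:
--                     best_match = value
--                     best_score = score
--
--     if best_match is not None: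
--         return best_match
--     else:
--         raise ValueError(f"No key found with patterns {key_patterns}")
-- ===== SOURCE B (Python) =====
-- def find_item_from_key_patterns(data, key_patterns):
--     pats = [p.lower() for p in key_patterns]
--     items = list(data.items())
--     # pass 1: first key equal (case-insensitively) to any pattern wins outright
--     for key, value in items:
--         if key.lower() in pats:
--             return value
--     # pass 2: per-key best partial-match score; earliest key with the maximal score wins
--     scored = [
--         (max((key.lower().count(p) for p in pats if p in key.lower()), default=-1), value)
--         for key, value in items
--     ]
--     best = max(scored, key=lambda t: t[0], default=(-1, ""))
--     if best[0] < 0: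
--         raise ValueError(f"No key found with patterns {key_patterns}")
--     return best[1]
-- ===== Notes on version B (the rewrite author's own statement) =====
-- stated objective: alternative
-- what changed: A threads a mutable best_match/best_score pair through one nested loop with an early return; B makes two independent passes: an exact-match scan, then a per-key score list (max of pattern counts per key) reduced with max(key=fst), which picks the same earliest-maximal value.
import Mathlib
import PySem

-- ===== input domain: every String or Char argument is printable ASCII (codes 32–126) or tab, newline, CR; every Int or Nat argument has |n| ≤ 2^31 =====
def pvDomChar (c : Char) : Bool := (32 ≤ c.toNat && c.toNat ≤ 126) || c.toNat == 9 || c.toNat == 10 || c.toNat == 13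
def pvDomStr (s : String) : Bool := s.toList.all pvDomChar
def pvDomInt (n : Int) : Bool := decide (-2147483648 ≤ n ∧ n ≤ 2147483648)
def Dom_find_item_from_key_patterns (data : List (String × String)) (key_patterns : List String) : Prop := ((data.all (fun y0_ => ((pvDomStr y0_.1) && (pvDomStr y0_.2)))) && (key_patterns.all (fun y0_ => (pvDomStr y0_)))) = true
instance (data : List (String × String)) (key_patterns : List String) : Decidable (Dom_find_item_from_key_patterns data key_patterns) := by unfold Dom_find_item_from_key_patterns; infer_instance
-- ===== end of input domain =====

-- B replaces A's single nested loop with a threaded best_match/best_score accumulator by two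
-- independent passes: an exact-match pass, then per-key score lists combined with max(key=…);
-- objective: alternative decomposition (same asymptotic cost).

-- ===== PORT A =====
-- inner 'for pattern in key_patterns' loop; '.inl v' models the early 'return value'
def pvAInner (key value : String) (st : Option String × Int) :
    List String → Sum String (Option String × Int)
  | [] => .inr st
  | p :: ps =>
    if PySem.Str.lower key == PySem.Str.lower p then .inl value
    else if PySem.Str.isIn (PySem.Str.lower p) (PySem.Str.lower key) then
      let score : Int := PySem.Str.count (PySem.Str.lower key) (PySem.Str.lower p)
      if score > st.2 then pvAInner key value (some value, score) ps
      else pvAInner key value st ps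
    else pvAInner key value st ps

-- outer 'for key, value in data.items()' loop
def pvAOuter (key_patterns : List String) (st : Option String × Int) :
    List (String × String) → Sum String (Option String × Int)
  | [] => .inr st
  | (k, v) :: rest =>
    match pvAInner k v st key_patterns with
    | .inl r => .inl r
    | .inr st' => pvAOuter key_patterns st' rest

def find_item_from_key_patterns (data : List (String × String)) (key_patterns : List String) : String :=
  match pvAOuter key_patterns (none, -1) data with
  | .inl r => r
  | .inr (some m, _) => m
  | .inr (none, _) => ""   -- A raises ValueError here; excluded by Pre_

-- ===== PORT B =====
-- max((key.lower().count(p) for p in pats if p in key.lower()), default=-1)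
def pvBScore (pats : List String) (key : String) : Int :=
  PySem.List.maxD
    ((pats.filter (fun p => PySem.Str.isIn p (PySem.Str.lower key))).map
      (fun p => ((PySem.Str.count (PySem.Str.lower key) p : Nat) : Int)))
    (fun x => x) (-1)

def find_item_from_key_patterns_alt (data : List (String × String)) (key_patterns : List String) : String :=
  let pats := key_patterns.map PySem.Str.lower
  match data.find? (fun kv => pats.contains (PySem.Str.lower kv.1)) with
  | some kv => kv.2
  | none =>
    let scored := data.map (fun kv => (pvBScore pats kv.1, kv.2))
    let best := PySem.List.maxD scored (fun t => t.1) (-1, "")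
    if best.1 < 0 then "" else best.2   -- B raises ValueError here; excluded by Pre_

-- ===== PRECONDITION & SPEC =====
-- Pre_ excludes exactly the inputs where no key case-insensitively contains any pattern:
-- there both Pythons raise ValueError.
def Pre_find_item_from_key_patterns (data : List (String × String)) (key_patterns : List String) : Prop :=
  data.any (fun kv => key_patterns.any (fun p =>
    PySem.Str.isIn (PySem.Str.lower p) (PySem.Str.lower kv.1))) = true
instance (data : List (String × String)) (key_patterns : List String) : Decidable (Pre_find_item_from_key_patterns data key_patterns) := by unfold Pre_find_item_from_key_patterns; infer_instance

def pvWitness_find_item_from_key_patterns : (List (String × String)) × List String :=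
  ([("Alpha", "x"), ("beta", "y")], ["ph"])

def Spec_find_item_from_key_patterns (data : List (String × String)) (key_patterns : List String) (out : String) : Prop := out = find_item_from_key_patterns_alt data key_patterns
instance (data : List (String × String)) (key_patterns : List String) (out : String) : Decidable (Spec_find_item_from_key_patterns data key_patterns out) := by unfold Spec_find_item_from_key_patterns; infer_instance

-- ===== CLAIM (what is proved, stated in full; the proofs are below) =====
def Claim_equal_find_item_from_key_patterns : Prop := ∀ (data : List (String × String)) (key_patterns : List String), Dom_find_item_from_key_patterns data key_patterns → Pre_find_item_from_key_patterns data key_patterns → Spec_find_item_from_key_patterns data key_patterns (find_item_from_key_patterns data key_patterns)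

-- ===== LEMMAS AND PROOFS =====

-- per-key list of partial-match scores, in pattern order (proof-side view of both programs)
def pvCs (ps : List String) (key : String) : List Int :=
  (ps.filter (fun p => PySem.Str.isIn (PySem.Str.lower p) (PySem.Str.lower key))).map
    (fun p => ((PySem.Str.count (PySem.Str.lower key) (PySem.Str.lower p) : Nat) : Int))

-- the fold step of PySem.List.max? with key (·.1)
def pvMaxStep (acc : Option (Int × String)) (x : Int × String) : Option (Int × String) :=
  match acc with
  | none => some x
  | some m => if m.1 < x.1 then some x else some m

theorem pvMax?_eq (l : List (Int × String)) :
    PySem.List.max? l (fun t => t.1) = l.foldl pvMaxStep none := by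
  unfold PySem.List.max? pvMaxStep
  congr 1
  funext acc x
  rcases acc with _ | m <;> simp

def pvFinishA : Sum String (Option String × Int) → String
  | .inl r => r
  | .inr (some m, _) => m
  | .inr (none, _) => ""

def pvFinishB (acc : Option (Int × String)) : String :=
  let best := acc.getD (-1, "")
  if best.1 < 0 then "" else best.2

-- invariant linking A's (best_match, best_score) with B's running max?-accumulator
def pvR (st : Option String × Int) (acc : Option (Int × String)) : Prop :=
  (st.2 = -1 ∧ st.1 = none ∧ (acc = none ∨ ∃ v, acc = some (-1, v)))
  ∨ (-1 < st.2 ∧ ∃ m, st.1 = some m ∧ acc = some (st.2, m))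

theorem pvFoldl_max_split (cs : List Int) (a b : Int) (h : a ≤ b) :
    cs.foldl max b = max b (cs.foldl max a) := by
  induction cs generalizing a b with
  | nil => simp; omega
  | cons c cs ih =>
    simp only [List.foldl_cons]
    rw [ih (max a c) (max b c) (by omega)]
    have h1 := (PySem.List.le_foldl_max cs (max a c)).1
    omega

theorem pvCs_nonneg (ps : List String) (key : String) : ∀ x ∈ pvCs ps key, 0 ≤ x := by
  intro x hx
  simp only [pvCs, List.mem_map] at hx
  obtain ⟨p, -, rfl⟩ := hx
  exact Int.natCast_nonneg _

theorem pvScore_eq (ps : List String) (key : String) :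
    pvBScore (ps.map PySem.Str.lower) key = (pvCs ps key).foldl max (-1) := by
  have hfm : ((ps.map PySem.Str.lower).filter
        (fun p => PySem.Str.isIn p (PySem.Str.lower key))).map
        (fun p => ((PySem.Str.count (PySem.Str.lower key) p : Nat) : Int)) = pvCs ps key := by
    rw [List.filter_map, List.map_map]
    simp only [pvCs]
    rfl
  unfold pvBScore
  rw [hfm]
  rcases hcs : pvCs ps key with _ | ⟨x, t⟩
  · rfl
  · have hx : 0 ≤ x := pvCs_nonneg ps key x (by simp [hcs])
    unfold PySem.List.maxD
    rw [PySem.List.max?_id_cons]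
    simp only [Option.getD_some, List.foldl_cons]
    have hmx : max (-1 : Int) x = x := by omega
    rw [hmx]

theorem pvScore_ge (ps : List String) (key : String) :
    -1 ≤ pvBScore (ps.map PySem.Str.lower) key := by
  rw [pvScore_eq]
  exact (PySem.List.le_foldl_max (pvCs ps key) (-1)).1

theorem pvInner_char (ps : List String) (key value : String) (bm : Option String) (bs : Int)
    (h : ps.any (fun p => PySem.Str.lower key == PySem.Str.lower p) = false) :
    pvAInner key value (bm, bs) ps =
      .inr (if bs < (pvCs ps key).foldl max bs then some value else bm,
            (pvCs ps key).foldl max bs) := by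
  induction ps generalizing bm bs with
  | nil => simp [pvAInner, pvCs]
  | cons p ps ih =>
    simp only [List.any_cons, Bool.or_eq_false_iff] at h
    obtain ⟨h1, h2⟩ := h
    simp only [pvAInner, h1, Bool.false_eq_true, if_false]
    by_cases hin : PySem.Str.isIn (PySem.Str.lower p) (PySem.Str.lower key) = true
    · have hcs : pvCs (p :: ps) key =
          ((PySem.Str.count (PySem.Str.lower key) (PySem.Str.lower p) : Nat) : Int)
            :: pvCs ps key := by
        simp only [pvCs, List.filter_cons, hin, if_true, List.map_cons]
      set c : Int := ((PySem.Str.count (PySem.Str.lower key) (PySem.Str.lower p) : Nat) : Int)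
        with hc
      rw [if_pos hin, hcs]
      simp only [List.foldl_cons]
      by_cases hlt : c > bs
      · rw [if_pos hlt, ih _ _ h2]
        have hmax : max bs c = c := by omega
        have hge := (PySem.List.le_foldl_max (pvCs ps key) c).1
        simp only [hmax, ite_self]
        rw [if_pos (show bs < List.foldl max c (pvCs ps key) by omega)]
      · rw [if_neg hlt, ih _ _ h2]
        have hmax : max bs c = bs := by omega
        simp only [hmax]
    · have hcs : pvCs (p :: ps) key = pvCs ps key := by
        simp only [pvCs, List.filter_cons, hin, if_false, Bool.false_eq_true]
      rw [if_neg hin, hcs, ih _ _ h2]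

theorem pvExact_inner (ps : List String) (key value : String)
    (h : ps.any (fun p => PySem.Str.lower key == PySem.Str.lower p) = true) :
    ∀ bm bs, pvAInner key value (bm, bs) ps = .inl value := by
  induction ps with
  | nil => simp at h
  | cons p ps ih =>
    intro bm bs
    simp only [List.any_cons, Bool.or_eq_true] at h
    by_cases h1 : (PySem.Str.lower key == PySem.Str.lower p) = true
    · simp [pvAInner, h1]
    · have h2 : ps.any (fun p => PySem.Str.lower key == PySem.Str.lower p) = true := by
        rcases h with h | h
        · exact absurd h h1
        · exact h
      simp only [pvAInner, h1, Bool.false_eq_true, if_false]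
      split_ifs <;> exact ih h2 _ _

theorem pvContains_lower (l : List String) (x : String) :
    (l.map PySem.Str.lower).contains x = l.any (fun p => x == PySem.Str.lower p) := by
  induction l with
  | nil => rfl
  | cons p l ih => rw [List.map_cons, List.contains_cons, ih, List.any_cons]

theorem pvExact_first (kps : List String) (data : List (String × String)) :
    ∀ (st : Option String × Int) (kv : String × String),
      data.find? (fun kv => (kps.map PySem.Str.lower).contains (PySem.Str.lower kv.1))
        = some kv →
      pvAOuter kps st data = .inl kv.2 := by
  induction data with
  | nil => intro st kv h; simp at h
  | cons a rest ih =>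
    intro st kv h
    obtain ⟨k, v⟩ := a
    obtain ⟨bm, bs⟩ := st
    rw [List.find?_cons] at h
    by_cases hp : ((kps.map PySem.Str.lower).contains (PySem.Str.lower k)) = true
    · simp only [hp] at h
      have hkv : kv = (k, v) := by simpa using h.symm
      have hex : kps.any (fun p => PySem.Str.lower k == PySem.Str.lower p) = true := by
        rw [← pvContains_lower]; exact hp
      simp only [pvAOuter, pvExact_inner kps k v hex bm bs, hkv]
    · simp only [Bool.not_eq_true] at hp
      simp only [hp] at h
      have hne : kps.any (fun p => PySem.Str.lower k == PySem.Str.lower p) = false := by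
        rw [← pvContains_lower]; exact hp
      simp only [pvAOuter, pvInner_char kps k v bm bs hne]
      exact ih _ _ h

theorem pvR_ge (bm : Option String) (bs : Int) (acc : Option (Int × String))
    (h : pvR (bm, bs) acc) : -1 ≤ bs := by
  rcases h with ⟨h2, -, -⟩ | ⟨h2, -⟩
  · replace h2 : bs = -1 := h2
    omega
  · replace h2 : -1 < bs := h2
    omega

theorem pvR_step (bm : Option String) (bs : Int) (acc : Option (Int × String))
    (v : String) (s : Int) (hs : -1 ≤ s) (hR : pvR (bm, bs) acc) :
    pvR (if bs < max bs s then some v else bm, max bs s) (pvMaxStep acc (s, v)) := by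
  rcases hR with ⟨h2, h1, hacc | ⟨w, hacc⟩⟩ | ⟨hlt, m, h1, hacc⟩
  · replace h2 : bs = -1 := h2
    replace h1 : bm = none := h1
    subst h1; subst h2; subst hacc
    by_cases hlt : -1 < s
    · have hm : max (-1 : Int) s = s := by omega
      rw [hm, if_pos hlt]
      exact Or.inr ⟨hlt, v, rfl, rfl⟩
    · have hseq : s = -1 := by omega
      subst hseq
      simp only [pvMaxStep, max_self, lt_irrefl, if_false]
      exact Or.inl ⟨rfl, rfl, Or.inr ⟨v, rfl⟩⟩
  · replace h2 : bs = -1 := h2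
    replace h1 : bm = none := h1
    subst h1; subst h2; subst hacc
    by_cases hlt : -1 < s
    · have hm : max (-1 : Int) s = s := by omega
      rw [hm, if_pos hlt]
      simp only [pvMaxStep, if_pos hlt]
      exact Or.inr ⟨hlt, v, rfl, rfl⟩
    · have hseq : s = -1 := by omega
      subst hseq
      simp only [pvMaxStep, max_self, lt_irrefl, if_false]
      exact Or.inl ⟨rfl, rfl, Or.inr ⟨w, rfl⟩⟩
  · replace hlt : -1 < bs := hlt
    replace h1 : bm = some m := h1
    replace hacc : acc = some (bs, m) := hacc
    subst h1; subst hacc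
    by_cases hlt2 : bs < s
    · have hm : max bs s = s := by omega
      rw [hm, if_pos hlt2]
      simp only [pvMaxStep, if_pos hlt2]
      exact Or.inr ⟨by omega, v, rfl, rfl⟩
    · have hm : max bs s = bs := by omega
      rw [hm, if_neg (lt_irrefl bs)]
      simp only [pvMaxStep, if_neg hlt2]
      exact Or.inr ⟨hlt, m, rfl, rfl⟩

theorem pvOuter_char (kps : List String) (data : List (String × String)) :
    ∀ (bm : Option String) (bs : Int) (acc : Option (Int × String)),
      (∀ kv ∈ data, (kps.any fun p => PySem.Str.lower kv.1 == PySem.Str.lower p) = false) →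
      pvR (bm, bs) acc →
      pvFinishA (pvAOuter kps (bm, bs) data)
        = pvFinishB ((data.map
            (fun kv => (pvBScore (kps.map PySem.Str.lower) kv.1, kv.2))).foldl pvMaxStep acc) := by
  induction data with
  | nil =>
    intro bm bs acc _ hR
    rcases hR with ⟨h2, h1, hacc | ⟨w, hacc⟩⟩ | ⟨hlt, m, h1, hacc⟩
    · replace h1 : bm = none := h1
      subst h1; subst hacc
      simp [pvAOuter, pvFinishA, pvFinishB]
    · replace h1 : bm = none := h1
      subst h1; subst hacc
      simp [pvAOuter, pvFinishA, pvFinishB]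
    · replace hlt : -1 < bs := hlt
      replace h1 : bm = some m := h1
      replace hacc : acc = some (bs, m) := hacc
      subst h1; subst hacc
      simp only [pvAOuter, List.map_nil, List.foldl_nil, pvFinishA, pvFinishB, Option.getD_some]
      rw [if_neg (by omega)]
  | cons a rest ih =>
    intro bm bs acc hne hR
    obtain ⟨k, v⟩ := a
    have hk := hne (k, v) List.mem_cons_self
    have hrest : ∀ kv ∈ rest,
        (kps.any fun p => PySem.Str.lower kv.1 == PySem.Str.lower p) = false :=
      fun kv h => hne kv (List.mem_cons_of_mem _ h)
    have hbs : -1 ≤ bs := pvR_ge bm bs acc hR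
    have hs : -1 ≤ pvBScore (kps.map PySem.Str.lower) k := pvScore_ge kps k
    have hM : (pvCs kps k).foldl max bs = max bs (pvBScore (kps.map PySem.Str.lower) k) := by
      rw [pvScore_eq, pvFoldl_max_split (pvCs kps k) (-1) bs hbs]
    simp only [pvAOuter, pvInner_char kps k v bm bs hk, hM, List.map_cons, List.foldl_cons]
    exact ih _ _ _ hrest (pvR_step bm bs acc v _ hs hR)

theorem pvA_finish (data : List (String × String)) (kps : List String) :
    find_item_from_key_patterns data kps = pvFinishA (pvAOuter kps (none, -1) data) := by
  unfold find_item_from_key_patterns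
  rcases h : pvAOuter kps (none, -1) data with r | ⟨_ | m, sc⟩ <;> rfl

-- ===== VERDICT (by name: the statement is the Claim_ definition above) =====
theorem find_item_from_key_patterns_spec : Claim_equal_find_item_from_key_patterns := by
  intro data kps _ _
  unfold Spec_find_item_from_key_patterns
  rw [pvA_finish]
  unfold find_item_from_key_patterns_alt
  rcases hfind : data.find?
      (fun kv => (kps.map PySem.Str.lower).contains (PySem.Str.lower kv.1)) with _ | kv
  · simp only [hfind]
    have hne : ∀ kv ∈ data,
        (kps.any fun p => PySem.Str.lower kv.1 == PySem.Str.lower p) = false := by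
      intro kv hkv
      have h := List.find?_eq_none.mp hfind kv hkv
      rw [← pvContains_lower]
      simpa using h
    rw [pvOuter_char kps data none (-1) none hne (Or.inl ⟨rfl, rfl, Or.inl rfl⟩)]
    unfold PySem.List.maxD
    rw [pvMax?_eq]
    rfl
  · simp only [hfind]
    rw [pvExact_first kps data (none, -1) kv hfind]
    rfl
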